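-- pv_equiv track=rewrite | github.com/DVBeckwitt/ra_sim | scripts/debug/analyze_geometry_fit_jacobians.py | _correlation_blocks
-- ===== SOURCE A (Python) =====
-- from collections import Counter, defaultdict
-- from typing import Any, Iterable, Mapping, Sequence
--
-- def _correlation_blocks(high_pairs: Sequence[Mapping[str, Any]]) -> list[tuple[str, ...]]:
--     adjacency: dict[str, set[str]] = defaultdict(set)
--     for pair in high_pairs:
--         left = str(pair.get("name_i", "")).strip()
--         right = str(pair.get("name_j", "")).strip()
--         if not left or not right:
--             continue
--         adjacency[left].add(right)
--         adjacency[right].add(left)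
--     blocks: list[tuple[str, ...]] = []
--     seen: set[str] = set()
--     for start in sorted(adjacency):
--         if start in seen:
--             continue
--         stack = [start]
--         block: list[str] = []
--         while stack:
--             current = stack.pop()
--             if current in seen:
--                 continue
--             seen.add(current)
--             block.append(current)
--             stack.extend(sorted(adjacency[current] - seen))
--         if len(block) >= 2:
--             blocks.append(tuple(sorted(block)))
--     return blocks
-- ===== SOURCE B (Python) =====
-- def _correlation_blocks(high_pairs):
--     # Incremental component merging (disjoint-set lists) instead of adjacency + DFS.
--     comps = []  # list of disjoint sets of names
--     for pair in high_pairs: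
--         left = str(pair.get("name_i", "")).strip()
--         right = str(pair.get("name_j", "")).strip()
--         if not left or not right:
--             continue
--         merged = {left, right}
--         rest = []
--         for c in comps:
--             if left in c or right in c:
--                 merged |= c
--             else:
--                 rest.append(c)
--         comps = rest + [merged]
--     blocks = [tuple(sorted(c)) for c in comps if len(c) >= 2]
--     blocks.sort(key=lambda t: t[0])
--     return blocks
-- ===== Notes on version B (the rewrite author's own statement) =====
-- stated objective: alternative
-- what changed: Replaces A's adjacency-dict plus sorted-DFS-with-seen-set traversal by incremental merging of disjoint component sets (one merge pass per edge), then filtering components of size >= 2 and sorting the sorted blocks by their first (minimum) element.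
import Mathlib
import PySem

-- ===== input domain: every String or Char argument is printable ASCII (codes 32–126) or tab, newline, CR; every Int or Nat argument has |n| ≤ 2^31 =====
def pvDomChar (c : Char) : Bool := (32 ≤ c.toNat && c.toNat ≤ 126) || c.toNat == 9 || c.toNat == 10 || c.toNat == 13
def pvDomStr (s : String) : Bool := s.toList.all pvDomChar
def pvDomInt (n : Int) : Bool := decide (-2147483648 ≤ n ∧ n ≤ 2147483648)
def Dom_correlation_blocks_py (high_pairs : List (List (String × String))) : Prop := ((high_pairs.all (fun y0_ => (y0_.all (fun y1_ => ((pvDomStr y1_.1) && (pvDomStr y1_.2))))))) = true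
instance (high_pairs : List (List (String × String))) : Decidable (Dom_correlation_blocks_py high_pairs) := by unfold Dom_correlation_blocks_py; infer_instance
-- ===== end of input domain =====

-- B replaces A's adjacency-dict + sorted DFS traversal by incremental merging of disjoint
-- component sets, one merge pass per edge (objective: alternative algorithm; not claimed faster).

-- ===== PORT A =====
-- shared helper: both Pythons compute left/right with the same line
-- `str(pair.get(k, "")).strip()` (values are strings, so str() is the identity;
-- assoc-list dict lookup = first match per the type convention).
def pvGetStrip (pair : List (String × String)) (k : String) : String :=
  PySem.Str.strip (((pair.find? (fun kv => kv.1 == k)).map (fun kv => kv.2)).getD "")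

-- one step of A's `for pair in high_pairs:` adjacency-building loop
def adjStep (adj : PySem.Dict String (PySem.Set String)) (pair : List (String × String)) :
    PySem.Dict String (PySem.Set String) :=
  let left := pvGetStrip pair "name_i"
  let right := pvGetStrip pair "name_j"
  if left = "" || right = "" then adj
  else
    (adj.modify left PySem.Set.empty (fun s => PySem.Set.add s right)).modify right
      PySem.Set.empty (fun s => PySem.Set.add s left)

def pvAdj (high_pairs : List (List (String × String))) : PySem.Dict String (PySem.Set String) :=
  high_pairs.foldl adjStep PySem.Dict.empty

-- the DFS `while stack:` loop of A; the stack is represented top-first (Python pops from the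
-- end and extends with sorted(...), so here the reversed sorted list is pushed at the head);
-- `fuel` only makes the same computation total (proved sufficient below: `dfsA_spec`).
def dfsA (adj : PySem.Dict String (PySem.Set String)) :
    Nat → List String → PySem.Set String → List String → PySem.Set String × List String
  | 0, _, seen, block => (seen, block)
  | _ + 1, [], seen, block => (seen, block)
  | fuel + 1, current :: stack, seen, block =>
    if PySem.Set.contains seen current then dfsA adj fuel stack seen block
    else
      let seen' := PySem.Set.add seen current
      let block' := block ++ [current]
      let news := PySem.List.sorted (PySem.Set.diff (adj.getD current PySem.Set.empty) seen')
        (fun x => x) false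
      dfsA adj fuel (news.reverse ++ stack) seen' block'

-- one step of A's `for start in sorted(adjacency):` loop, over the state (seen, blocks)
def outerStep (adj : PySem.Dict String (PySem.Set String)) (fuel : Nat)
    (sb : PySem.Set String × List (List String)) (start : String) :
    PySem.Set String × List (List String) :=
  if PySem.Set.contains sb.1 start then sb
  else
    let r := dfsA adj fuel [start] sb.1 []
    if 2 ≤ r.2.length then (r.1, sb.2 ++ [PySem.List.sorted r.2 (fun x => x) false])
    else (r.1, sb.2)

def correlation_blocks_py (high_pairs : List (List (String × String))) : List (List String) :=
  let adjacency := pvAdj high_pairs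
  let fuel := 2 + (adjacency.values.map List.length).sum
  ((PySem.List.sorted adjacency.keys (fun x => x) false).foldl (outerStep adjacency fuel)
    (PySem.Set.empty, [])).2

-- ===== PORT B =====
-- one step of B's inner `for c in comps:` merge loop, over the state (merged, rest)
def mergeStep (left right : String)
    (mr : PySem.Set String × List (PySem.Set String)) (c : PySem.Set String) :
    PySem.Set String × List (PySem.Set String) :=
  if PySem.Set.contains c left || PySem.Set.contains c right then
    (PySem.Set.union mr.1 c, mr.2)
  else (mr.1, mr.2 ++ [c])

def pvComps (high_pairs : List (List (String × String))) : List (PySem.Set String) :=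
  high_pairs.foldl (fun comps pair =>
    let left := pvGetStrip pair "name_i"
    let right := pvGetStrip pair "name_j"
    if left = "" || right = "" then comps
    else
      let mr := comps.foldl (mergeStep left right) (PySem.Set.ofList [left, right], [])
      mr.2 ++ [mr.1]) []

def correlation_blocks_py_alt (high_pairs : List (List (String × String))) : List (List String) :=
  let comps := pvComps high_pairs
  let blocks := (comps.filter (fun c => 2 ≤ c.length)).map
    (fun c => PySem.List.sorted c (fun x => x) false)
  PySem.List.sorted blocks (fun t => PySem.List.pyGetD t 0 "") false

-- ===== PRECONDITION & SPEC =====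
def Spec_correlation_blocks_py (high_pairs : List (List (String × String))) (out : List (List String)) : Prop := out = correlation_blocks_py_alt high_pairs
instance (high_pairs : List (List (String × String))) (out : List (List String)) : Decidable (Spec_correlation_blocks_py high_pairs out) := by unfold Spec_correlation_blocks_py; infer_instance

-- ===== CLAIM (what is proved, stated in full; the proofs are below) =====
def Claim_equal_correlation_blocks_py : Prop := ∀ (high_pairs : List (List (String × String))), Dom_correlation_blocks_py high_pairs → Spec_correlation_blocks_py high_pairs (correlation_blocks_py high_pairs)

-- ===== LEMMAS AND PROOFS =====

-- ---- the common graph: edges, undirected edge relation, connectivity ----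

def pvLR (pair : List (String × String)) : String × String :=
  (pvGetStrip pair "name_i", pvGetStrip pair "name_j")

def pvKeep (pair : List (String × String)) : Bool :=
  !((pvLR pair).1 = "" || (pvLR pair).2 = "")

def pvEdges (high_pairs : List (List (String × String))) : List (String × String) :=
  (high_pairs.filter pvKeep).map pvLR

def pvE (es : List (String × String)) (a b : String) : Prop := (a, b) ∈ es ∨ (b, a) ∈ es

def pvConn (es : List (String × String)) : String → String → Prop :=
  Relation.ReflTransGen (pvE es)

def pvNode (es : List (String × String)) (x : String) : Prop := ∃ y, pvE es x y

def Dj (c c' : List String) : Prop := ∀ x, x ∈ c → x ∉ c'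

lemma pvE_symm {es a b} (h : pvE es a b) : pvE es b a := by
  unfold pvE at *; tauto

lemma pvConn_symm {es a b} (h : pvConn es a b) : pvConn es b a :=
  Relation.ReflTransGen.symmetric (fun _ _ hab => pvE_symm hab) h

lemma pvNode_of_E {es a b} (h : pvE es a b) : pvNode es a ∧ pvNode es b :=
  ⟨⟨b, h⟩, ⟨a, pvE_symm h⟩⟩

lemma pvConn_node {es a b} (h : pvConn es a b) (ha : pvNode es a) : pvNode es b := by
  induction h with
  | refl => exact ha
  | tail _ hstep _ => exact (pvNode_of_E hstep).2

lemma pvE_snoc {es e a b} : pvE (es ++ [e]) a b ↔ pvE es a b ∨ (a = e.1 ∧ b = e.2) ∨ (a = e.2 ∧ b = e.1) := by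
  cases e; simp [pvE, List.mem_append, Prod.ext_iff]; tauto

lemma pvConn_mono_snoc {es e a b} (h : pvConn es a b) : pvConn (es ++ [e]) a b :=
  Relation.ReflTransGen.mono (fun _ _ hab => by
    rcases hab with h1 | h1
    · exact Or.inl (List.mem_append_left _ h1)
    · exact Or.inr (List.mem_append_left _ h1)) h

lemma pvConn_snoc {es : List (String × String)} {e a b} :
    pvConn (es ++ [e]) a b ↔
      pvConn es a b ∨ (pvConn es a e.1 ∧ pvConn es e.2 b) ∨ (pvConn es a e.2 ∧ pvConn es e.1 b) := by
  constructor
  · intro h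
    induction h with
    | refl => exact Or.inl Relation.ReflTransGen.refl
    | tail _ hstep ih =>
      rename_i m b' _
      rcases pvE_snoc.mp hstep with hold | ⟨hm, hb⟩ | ⟨hm, hb⟩
      · rcases ih with ih | ⟨ih1, ih2⟩ | ⟨ih1, ih2⟩
        · exact Or.inl (ih.tail hold)
        · exact Or.inr (Or.inl ⟨ih1, ih2.tail hold⟩)
        · exact Or.inr (Or.inr ⟨ih1, ih2.tail hold⟩)
      · subst hm; subst hb
        rcases ih with ih | ⟨ih1, _⟩ | ⟨ih1, _⟩
        · exact Or.inr (Or.inl ⟨ih, Relation.ReflTransGen.refl⟩)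
        · exact Or.inr (Or.inl ⟨ih1, Relation.ReflTransGen.refl⟩)
        · exact Or.inl ih1
      · subst hm; subst hb
        rcases ih with ih | ⟨ih1, _⟩ | ⟨ih1, _⟩
        · exact Or.inr (Or.inr ⟨ih, Relation.ReflTransGen.refl⟩)
        · exact Or.inl ih1
        · exact Or.inr (Or.inr ⟨ih1, Relation.ReflTransGen.refl⟩)
  · have hnew : pvConn (es ++ [e]) e.1 e.2 :=
      Relation.ReflTransGen.single (Or.inl (List.mem_append_right _ (by simp)))
    rintro (h | ⟨h1, h2⟩ | ⟨h1, h2⟩)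
    · exact pvConn_mono_snoc h
    · exact ((pvConn_mono_snoc h1).trans hnew).trans (pvConn_mono_snoc h2)
    · exact ((pvConn_mono_snoc h1).trans (pvConn_symm hnew)).trans (pvConn_mono_snoc h2)

lemma pvNode_snoc {es e x} : pvNode (es ++ [e]) x ↔ pvNode es x ∨ x = e.1 ∨ x = e.2 := by
  constructor
  · rintro ⟨y, hy⟩
    rcases pvE_snoc.mp hy with h | ⟨h, _⟩ | ⟨h, _⟩
    · exact Or.inl ⟨y, h⟩
    · exact Or.inr (Or.inl h)
    · exact Or.inr (Or.inr h)
  · rintro (⟨y, hy⟩ | h | h)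
    · exact ⟨y, pvE_snoc.mpr (Or.inl hy)⟩
    · exact ⟨e.2, pvE_snoc.mpr (Or.inr (Or.inl ⟨h, rfl⟩))⟩
    · exact ⟨e.1, pvE_snoc.mpr (Or.inr (Or.inr ⟨h, rfl⟩))⟩

lemma Dj_symm {c c'} (h : Dj c c') : Dj c' c := fun x hx hx' => h x hx' hx

lemma pvEdges_cons (pair hp) :
    pvEdges (pair :: hp) = if pvKeep pair then pvLR pair :: pvEdges hp else pvEdges hp := by
  simp only [pvEdges, List.filter_cons]
  split_ifs <;> simp_all

-- ---- A's adjacency dict describes exactly the edge relation ----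

def AdjGood (d : PySem.Dict String (PySem.Set String)) (es : List (String × String)) : Prop :=
  d.keys.Nodup ∧ (∀ x, (d.getD x PySem.Set.empty).Nodup) ∧
  (∀ x y, y ∈ d.getD x PySem.Set.empty ↔ pvE es x y) ∧
  (∀ x, x ∈ d.keys ↔ pvNode es x)

lemma adjGood_insert {d es} (h : AdjGood d es) (l r : String) :
    AdjGood ((d.modify l PySem.Set.empty (fun s => PySem.Set.add s r)).modify r
      PySem.Set.empty (fun s => PySem.Set.add s l)) (es ++ [(l, r)]) := by
  obtain ⟨hnd, hvnd, hmem, hkeys⟩ := h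
  have hgetD : ∀ x, ((d.modify l PySem.Set.empty (fun s => PySem.Set.add s r)).modify r
      PySem.Set.empty (fun s => PySem.Set.add s l)).getD x PySem.Set.empty =
      (if x = r then PySem.Set.add (if r = l then PySem.Set.add (d.getD l PySem.Set.empty) r
          else d.getD r PySem.Set.empty) l
        else if x = l then PySem.Set.add (d.getD l PySem.Set.empty) r
        else d.getD x PySem.Set.empty) := by
    intro x
    rw [PySem.Dict.getD_modify, PySem.Dict.getD_modify, PySem.Dict.getD_modify]
  refine ⟨?_, ?_, ?_, ?_⟩
  · rw [PySem.Dict.keys_modify]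
    apply PySem.Dict.nodup_keys_insert
    rw [PySem.Dict.keys_modify]
    exact PySem.Dict.nodup_keys_insert _ _ _ hnd
  · intro x
    rw [hgetD]
    split_ifs <;> first
      | exact hvnd _
      | exact PySem.Set.nodup_add _ _ (hvnd _)
      | exact PySem.Set.nodup_add _ _ (PySem.Set.nodup_add _ _ (hvnd _))
  · intro x y
    rw [hgetD]
    have he := @pvE_snoc es (l, r) x y
    simp only at he
    rw [he]
    split_ifs <;> subst_eqs <;>
      simp only [PySem.Set.empty] at hmem ⊢ <;> simp [PySem.Set.mem_add, hmem] <;> tauto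
  · intro x
    rw [← PySem.Dict.contains_iff_mem_keys, PySem.Dict.contains_modify,
      PySem.Dict.contains_modify]
    have hn := @pvNode_snoc es (l, r) x
    simp only at hn
    rw [hn]
    simp only [Bool.or_eq_true, beq_iff_eq]
    rw [PySem.Dict.contains_iff_mem_keys, hkeys]
    tauto

lemma adjGood_step {d es} (h : AdjGood d es) (pair) :
    AdjGood (adjStep d pair) (if pvKeep pair then es ++ [pvLR pair] else es) := by
  by_cases h1 : pvGetStrip pair "name_i" = ""
  · have hk : pvKeep pair = false := by simp [pvKeep, pvLR, h1]
    rw [hk]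
    simp only [adjStep]
    rw [if_pos (by simp [h1])]
    exact h
  · by_cases h2 : pvGetStrip pair "name_j" = ""
    · have hk : pvKeep pair = false := by simp [pvKeep, pvLR, h2]
      rw [hk]
      simp only [adjStep]
      rw [if_pos (by simp [h2])]
      exact h
    · have hk : pvKeep pair = true := by simp [pvKeep, pvLR, h1, h2]
      rw [hk]
      simp only [adjStep]
      rw [if_neg (by simp [h1, h2])]
      have h2' := adjGood_insert h (pvGetStrip pair "name_i") (pvGetStrip pair "name_j")
      simpa [pvLR] using h2'

lemma adjGood_fold : ∀ (hp : List (List (String × String))) d es, AdjGood d es →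
    AdjGood (hp.foldl adjStep d) (es ++ pvEdges hp) := by
  intro hp
  induction hp with
  | nil => intro d es h; simpa [pvEdges] using h
  | cons pair hp ih =>
    intro d es h
    have h' := adjGood_step h pair
    rw [List.foldl_cons, pvEdges_cons]
    by_cases hk : pvKeep pair = true
    · rw [hk] at h'
      rw [if_pos hk]
      have := ih (adjStep d pair) (es ++ [pvLR pair]) (by simpa using h')
      simpa [List.append_assoc] using this
    · rw [Bool.not_eq_true] at hk
      rw [hk] at h'
      rw [if_neg (by simp [hk])]
      exact ih (adjStep d pair) es (by simpa using h')

lemma adjGood_pvAdj (hp) : AdjGood (pvAdj hp) (pvEdges hp) := by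
  have base : AdjGood PySem.Dict.empty [] := by
    refine ⟨by simp [PySem.Dict.keys_empty], ?_, ?_, ?_⟩
    · intro x; simp [PySem.Dict.getD_empty, PySem.Set.empty]
    · intro x y; simp [PySem.Dict.getD_empty, PySem.Set.empty, pvE]
    · intro x; simp [PySem.Dict.keys_empty, pvNode, pvE]
  simpa using adjGood_fold hp PySem.Dict.empty [] base

-- ---- B's merge fold, characterized ----

lemma mergeFold_snd (l r) : ∀ (comps : List (PySem.Set String)) m0 r0,
    (comps.foldl (mergeStep l r) (m0, r0)).2 =
      r0 ++ comps.filter (fun c => !(PySem.Set.contains c l || PySem.Set.contains c r)) := by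
  intro comps
  induction comps with
  | nil => intro m0 r0; simp
  | cons c comps ih =>
    intro m0 r0
    rw [List.foldl_cons, List.filter_cons]
    by_cases hc : (PySem.Set.contains c l || PySem.Set.contains c r) = true
    · rw [mergeStep, if_pos hc, if_neg (by rw [hc]; simp)]
      exact ih _ _
    · rw [mergeStep, if_neg hc, if_pos (by rw [Bool.not_eq_true] at hc; rw [hc]; simp)]
      simp [ih]

lemma mergeFold_fst_mem (l r) : ∀ (comps : List (PySem.Set String)) m0 r0 x,
    (x ∈ (comps.foldl (mergeStep l r) (m0, r0)).1 ↔
      x ∈ m0 ∨ ∃ c ∈ comps, (PySem.Set.contains c l || PySem.Set.contains c r) = true ∧ x ∈ c) := by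
  intro comps
  induction comps with
  | nil => intro m0 r0 x; simp
  | cons c comps ih =>
    intro m0 r0 x
    rw [List.foldl_cons]
    by_cases hc : (PySem.Set.contains c l || PySem.Set.contains c r) = true
    · rw [mergeStep, if_pos hc]
      rw [ih]
      simp only [PySem.Set.mem_union]
      constructor
      · rintro (⟨h | h⟩ | ⟨c', hc', ht, hx⟩)
        · exact Or.inl h
        · exact Or.inr ⟨c, List.mem_cons_self .., hc, h⟩
        · exact Or.inr ⟨c', List.mem_cons_of_mem _ hc', ht, hx⟩
      · rintro (h | ⟨c', hc', ht, hx⟩)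
        · exact Or.inl (Or.inl h)
        · rcases List.mem_cons.mp hc' with rfl | hc'
          · exact Or.inl (Or.inr hx)
          · exact Or.inr ⟨c', hc', ht, hx⟩
    · rw [mergeStep, if_neg hc]
      rw [ih]
      constructor
      · rintro (h | ⟨c', hc', ht, hx⟩)
        · exact Or.inl h
        · exact Or.inr ⟨c', List.mem_cons_of_mem _ hc', ht, hx⟩
      · rintro (h | ⟨c', hc', ht, hx⟩)
        · exact Or.inl h
        · rcases List.mem_cons.mp hc' with rfl | hc'
          · exact absurd ht hc
          · exact Or.inr ⟨c', hc', ht, hx⟩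

lemma mergeFold_fst_nodup (l r) : ∀ (comps : List (PySem.Set String)) m0 r0,
    m0.Nodup → (comps.foldl (mergeStep l r) (m0, r0)).1.Nodup := by
  intro comps
  induction comps with
  | nil => intro m0 r0 h; exact h
  | cons c comps ih =>
    intro m0 r0 h
    rw [List.foldl_cons, mergeStep]
    split_ifs
    · exact ih _ _ (PySem.Set.nodup_union _ _ h)
    · exact ih _ _ h

-- ---- the component invariant of B ----

def CInv (es : List (String × String)) (comps : List (PySem.Set String)) : Prop :=
  (∀ c ∈ comps, c ≠ [] ∧ c.Nodup) ∧
  (∀ c ∈ comps, ∀ a ∈ c, ∀ b, (b ∈ c ↔ pvConn es a b ∧ pvNode es b)) ∧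
  (∀ x, pvNode es x ↔ ∃ c ∈ comps, x ∈ c) ∧
  List.Pairwise Dj comps

lemma inv_nil : CInv [] [] := by
  refine ⟨by simp, by simp, ?_, by simp⟩
  intro x
  simp [pvNode, pvE]

lemma inv_step {es comps} (h : CInv es comps) (l r : String) :
    CInv (es ++ [(l, r)])
      (let mr := comps.foldl (mergeStep l r) (PySem.Set.ofList [l, r], []); mr.2 ++ [mr.1]) := by
  obtain ⟨hne, hcls, hcov, hdj⟩ := h
  set merged := (comps.foldl (mergeStep l r) (PySem.Set.ofList [l, r], [])).1 with hm
  have hrest : (comps.foldl (mergeStep l r) (PySem.Set.ofList [l, r], [])).2 =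
      comps.filter (fun c => !(PySem.Set.contains c l || PySem.Set.contains c r)) := by
    rw [mergeFold_snd]; simp
  have hmm : ∀ x, x ∈ merged ↔ (x = l ∨ x = r) ∨
      ∃ c ∈ comps, (PySem.Set.contains c l || PySem.Set.contains c r) = true ∧ x ∈ c := by
    intro x
    rw [hm, mergeFold_fst_mem]
    rw [PySem.Set.mem_ofList]
    simp
  have hnodex : ∀ c ∈ comps, ∀ x ∈ c, pvNode es x := by
    intro c hc x hx
    exact (hcov x).mpr ⟨c, hc, hx⟩
  -- fact1: untouched components are not connected to l or r
  have fact1 : ∀ c ∈ comps, (PySem.Set.contains c l || PySem.Set.contains c r) = false →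
      ∀ a ∈ c, ¬ pvConn es a l ∧ ¬ pvConn es a r := by
    intro c hc hT a ha
    simp only [Bool.or_eq_false_iff] at hT
    constructor
    · intro hconn
      have hl : l ∈ c := (hcls c hc a ha l).mpr ⟨hconn, pvConn_node hconn (hnodex c hc a ha)⟩
      have := (PySem.Set.contains_iff c l).mpr hl
      rw [hT.1] at this; cases this
    · intro hconn
      have hr : r ∈ c := (hcls c hc a ha r).mpr ⟨hconn, pvConn_node hconn (hnodex c hc a ha)⟩
      have := (PySem.Set.contains_iff c r).mpr hr
      rw [hT.2] at this; cases this
  have hnew : pvConn (es ++ [(l, r)]) l r :=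
    Relation.ReflTransGen.single (Or.inl (List.mem_append_right _ (by simp)))
  -- fact2: everything in merged is conn' to l
  have fact2 : ∀ x ∈ merged, pvConn (es ++ [(l, r)]) l x := by
    intro x hx
    rcases (hmm x).mp hx with (rfl | rfl) | ⟨c, hc, hT, hxc⟩
    · exact Relation.ReflTransGen.refl
    · exact hnew
    · rcases Bool.or_eq_true_iff.mp hT with hcl | hcr
      · have hl : l ∈ c := (PySem.Set.contains_iff c l).mp hcl
        have : pvConn es l x := ((hcls c hc l hl x).mp hxc).1
        exact pvConn_mono_snoc this
      · have hr : r ∈ c := (PySem.Set.contains_iff c r).mp hcr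
        have : pvConn es r x := ((hcls c hc r hr x).mp hxc).1
        exact hnew.trans (pvConn_mono_snoc this)
  -- merged is inside the new node set
  have hmnode : ∀ x ∈ merged, pvNode (es ++ [(l, r)]) x := by
    intro x hx
    rcases (hmm x).mp hx with (rfl | rfl) | ⟨c, hc, _, hxc⟩
    · exact pvNode_snoc.mpr (Or.inr (Or.inl rfl))
    · exact pvNode_snoc.mpr (Or.inr (Or.inr rfl))
    · exact pvNode_snoc.mpr (Or.inl (hnodex c hc x hxc))
  -- fact3: things connected (over es) to l or r that are nodes' lie in merged
  have fact3 : ∀ b, (pvConn es l b ∨ pvConn es r b) →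
      (pvNode es b ∨ b = l ∨ b = r) → b ∈ merged := by
    intro b hconn hb
    rcases hb with hb | rfl | rfl
    · obtain ⟨c, hc, hbc⟩ := (hcov b).mp hb
      rcases hconn with hconn | hconn
      · by_cases hnl : pvNode es l
        · have hl : l ∈ c := (hcls c hc b hbc l).mpr ⟨pvConn_symm hconn, hnl⟩
          exact (hmm b).mpr (Or.inr ⟨c, hc, by
            rw [Bool.or_eq_true_iff]; exact Or.inl ((PySem.Set.contains_iff c l).mpr hl), hbc⟩)
        · have : l = b := by
            rcases Relation.ReflTransGen.cases_head hconn with h1 | ⟨z, hz, _⟩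
            · exact h1
            · exact absurd ⟨z, hz⟩ hnl
          subst this
          exact (hmm _).mpr (Or.inl (Or.inl rfl))
      · by_cases hnr : pvNode es r
        · have hr : r ∈ c := (hcls c hc b hbc r).mpr ⟨pvConn_symm hconn, hnr⟩
          exact (hmm b).mpr (Or.inr ⟨c, hc, by
            rw [Bool.or_eq_true_iff]; exact Or.inr ((PySem.Set.contains_iff c r).mpr hr), hbc⟩)
        · have : r = b := by
            rcases Relation.ReflTransGen.cases_head hconn with h1 | ⟨z, hz, _⟩
            · exact h1
            · exact absurd ⟨z, hz⟩ hnr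
          subst this
          exact (hmm _).mpr (Or.inl (Or.inr rfl))
    · exact (hmm _).mpr (Or.inl (Or.inl rfl))
    · exact (hmm _).mpr (Or.inl (Or.inr rfl))
  show CInv _ ((comps.foldl (mergeStep l r) (PySem.Set.ofList [l, r], [])).2 ++
    [(comps.foldl (mergeStep l r) (PySem.Set.ofList [l, r], [])).1])
  rw [hrest, ← hm]
  have hmemsplit : ∀ c', c' ∈ comps.filter
      (fun c => !(PySem.Set.contains c l || PySem.Set.contains c r)) ++ [merged] ↔
      (c' ∈ comps ∧ (PySem.Set.contains c' l || PySem.Set.contains c' r) = false) ∨ c' = merged := by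
    intro c'
    rw [List.mem_append, List.mem_filter]
    simp
  refine ⟨?_, ?_, ?_, ?_⟩
  · -- nonempty and nodup
    intro c' hc'
    rcases (hmemsplit c').mp hc' with ⟨hc, _⟩ | rfl
    · exact hne c' hc
    · constructor
      · intro hnil
        have := (hmm l).mpr (Or.inl (Or.inl rfl))
        rw [hnil] at this; cases this
      · rw [hm]
        exact mergeFold_fst_nodup l r comps _ _ (PySem.Set.nodup_ofList _)
  · -- class characterization
    intro c' hc' a ha b
    rcases (hmemsplit c').mp hc' with ⟨hc, hT⟩ | rfl
    · constructor
      · intro hbc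
        refine ⟨pvConn_mono_snoc ((hcls c' hc a ha b).mp hbc).1, ?_⟩
        exact (@pvNode_snoc es (l, r) b).mpr (Or.inl (hnodex c' hc b hbc))
      · rintro ⟨hconn, hnode⟩
        have hcc : pvConn es a b := by
          rcases (@pvConn_snoc es (l, r) a b).mp hconn with h1 | ⟨h1, _⟩ | ⟨h1, _⟩
          · exact h1
          · exact absurd h1 (fact1 c' hc hT a ha).1
          · exact absurd h1 (fact1 c' hc hT a ha).2
        rcases (@pvNode_snoc es (l, r) b).mp hnode with hb | rfl | rfl
        · exact (hcls c' hc a ha b).mpr ⟨hcc, hb⟩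
        · exact absurd hcc (fact1 c' hc hT a ha).1
        · exact absurd hcc (fact1 c' hc hT a ha).2
    · constructor
      · intro hbm
        exact ⟨(pvConn_symm (fact2 a ha)).trans (fact2 b hbm), hmnode b hbm⟩
      · rintro ⟨hconn, hnode⟩
        have hlb : pvConn (es ++ [(l, r)]) l b := (fact2 a ha).trans hconn
        have : pvConn es l b ∨ pvConn es r b := by
          rcases (@pvConn_snoc es (l, r) l b).mp hlb with h1 | ⟨_, h2⟩ | ⟨_, h2⟩
          · exact Or.inl h1
          · exact Or.inr h2
          · exact Or.inl h2
        have hnb : pvNode es b ∨ b = l ∨ b = r := (@pvNode_snoc es (l, r) b).mp hnode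
        exact fact3 b this hnb
  · -- coverage
    intro x
    constructor
    · intro hx
      rcases (@pvNode_snoc es (l, r) x).mp hx with hx | rfl | rfl
      · obtain ⟨c, hc, hxc⟩ := (hcov x).mp hx
        by_cases hT : (PySem.Set.contains c l || PySem.Set.contains c r) = true
        · exact ⟨merged, (hmemsplit merged).mpr (Or.inr rfl),
            (hmm x).mpr (Or.inr ⟨c, hc, hT, hxc⟩)⟩
        · rw [Bool.not_eq_true] at hT
          exact ⟨c, (hmemsplit c).mpr (Or.inl ⟨hc, hT⟩), hxc⟩
      · exact ⟨merged, (hmemsplit merged).mpr (Or.inr rfl), (hmm _).mpr (Or.inl (Or.inl rfl))⟩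
      · exact ⟨merged, (hmemsplit merged).mpr (Or.inr rfl), (hmm _).mpr (Or.inl (Or.inr rfl))⟩
    · rintro ⟨c', hc', hxc'⟩
      rcases (hmemsplit c').mp hc' with ⟨hc, _⟩ | rfl
      · exact pvNode_snoc.mpr (Or.inl (hnodex c' hc x hxc'))
      · exact hmnode x hxc'
  · -- pairwise disjoint
    rw [List.pairwise_append]
    refine ⟨List.Pairwise.sublist List.filter_sublist hdj, by simp, ?_⟩
    intro c hc m hm
    rcases List.mem_singleton.mp hm with rfl
    rw [List.mem_filter] at hc
    obtain ⟨hcmem, hT⟩ := hc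
    rw [Bool.not_eq_true'] at hT
    intro x hxc hxm
    rcases (hmm x).mp hxm with (rfl | rfl) | ⟨c', hc', hT', hxc'⟩
    · have := (PySem.Set.contains_iff c x).mpr hxc
      rw [Bool.or_eq_false_iff] at hT
      rw [hT.1] at this; cases this
    · have := (PySem.Set.contains_iff c x).mpr hxc
      rw [Bool.or_eq_false_iff] at hT
      rw [hT.2] at this; cases this
    · have hne' : c ≠ c' := by
        intro hEq
        rw [hEq, hT'] at hT
        cases hT
      exact (List.Pairwise.forall (fun _ _ h => Dj_symm h) hdj hcmem hc' hne') x hxc hxc'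

lemma inv_fold : ∀ (hp : List (List (String × String))) es comps, CInv es comps →
    CInv (es ++ pvEdges hp)
      (hp.foldl (fun comps pair =>
        let left := pvGetStrip pair "name_i"
        let right := pvGetStrip pair "name_j"
        if left = "" || right = "" then comps
        else
          let mr := comps.foldl (mergeStep left right) (PySem.Set.ofList [left, right], [])
          mr.2 ++ [mr.1]) comps) := by
  intro hp
  induction hp with
  | nil => intro es comps h; simpa [pvEdges] using h
  | cons pair hp ih =>
    intro es comps h
    rw [List.foldl_cons, pvEdges_cons]
    by_cases h1 : pvGetStrip pair "name_i" = ""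
    · have hk : pvKeep pair = false := by simp [pvKeep, pvLR, h1]
      rw [hk, if_neg (by simp)]
      have hstep : (if pvGetStrip pair "name_i" = "" || pvGetStrip pair "name_j" = "" then comps
          else
            let mr := comps.foldl (mergeStep (pvGetStrip pair "name_i") (pvGetStrip pair "name_j"))
              (PySem.Set.ofList [pvGetStrip pair "name_i", pvGetStrip pair "name_j"], [])
            mr.2 ++ [mr.1]) = comps := by rw [if_pos (by simp [h1])]
      simp only [hstep]
      exact ih es comps h
    · by_cases h2 : pvGetStrip pair "name_j" = ""
      · have hk : pvKeep pair = false := by simp [pvKeep, pvLR, h2]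
        rw [hk, if_neg (by simp)]
        have hstep : (if pvGetStrip pair "name_i" = "" || pvGetStrip pair "name_j" = "" then comps
            else
              let mr := comps.foldl (mergeStep (pvGetStrip pair "name_i") (pvGetStrip pair "name_j"))
                (PySem.Set.ofList [pvGetStrip pair "name_i", pvGetStrip pair "name_j"], [])
              mr.2 ++ [mr.1]) = comps := by rw [if_pos (by simp [h2])]
        simp only [hstep]
        exact ih es comps h
      · have hk : pvKeep pair = true := by simp [pvKeep, pvLR, h1, h2]
        rw [hk, if_pos rfl]
        have hstep : (if pvGetStrip pair "name_i" = "" || pvGetStrip pair "name_j" = "" then comps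
            else
              let mr := comps.foldl (mergeStep (pvGetStrip pair "name_i") (pvGetStrip pair "name_j"))
                (PySem.Set.ofList [pvGetStrip pair "name_i", pvGetStrip pair "name_j"], [])
              mr.2 ++ [mr.1]) =
            (let mr := comps.foldl (mergeStep (pvGetStrip pair "name_i") (pvGetStrip pair "name_j"))
              (PySem.Set.ofList [pvGetStrip pair "name_i", pvGetStrip pair "name_j"], [])
             mr.2 ++ [mr.1]) := by rw [if_neg (by simp [h1, h2])]
      -- continue
        simp only [hstep]
        have hstep2 := inv_step h (pvGetStrip pair "name_i") (pvGetStrip pair "name_j")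
        have := ih (es ++ [pvLR pair]) _ (by simpa [pvLR] using hstep2)
        simpa [List.append_assoc] using this

lemma inv_pvComps (hp) : CInv (pvEdges hp) (pvComps hp) := by
  have := inv_fold hp [] [] inv_nil
  simpa [pvComps] using this

-- ---- DFS correctness ----

-- reachability avoiding a seen-set
def RS (es : List (String × String)) (S : List String) : String → String → Prop :=
  Relation.ReflTransGen (fun a b => pvE es a b ∧ b ∉ S)

def Reach (es : List (String × String)) (st S : List String) (y : String) : Prop :=
  ∃ x ∈ st, x ∉ S ∧ RS es S x y

def phi (adj : PySem.Dict String (PySem.Set String)) (st S : List String) : Nat :=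
  st.length +
    ((adj.keys.filter (fun v => !PySem.Set.contains S v)).map
      (fun v => (adj.getD v PySem.Set.empty).length)).sum

lemma RS_anti {es S S' x y} (hsub : ∀ z, z ∈ S → z ∈ S') (h : RS es S' x y) : RS es S x y :=
  Relation.ReflTransGen.mono (fun _ b hab => ⟨hab.1, fun hb => hab.2 (hsub b hb)⟩) h

lemma RS_not_mem {es S x y} (hx : x ∉ S) (h : RS es S x y) : y ∉ S := by
  induction h with
  | refl => exact hx
  | tail _ hstep _ => exact hstep.2

lemma RS_conn {es S x y} (h : RS es S x y) : pvConn es x y :=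
  Relation.ReflTransGen.mono (fun _ _ hab => hab.1) h

lemma conn_RS {es S start y} (hcl : ∀ z, pvConn es start z → z ∉ S) (h : pvConn es start y) :
    RS es S start y := by
  induction h with
  | refl => exact Relation.ReflTransGen.refl
  | tail hconn hstep ih => exact ih.tail ⟨hstep, hcl _ (hconn.tail hstep)⟩

lemma reroute {es S S' cur x y} (hS' : ∀ z, z ∈ S' ↔ z ∈ S ∨ z = cur)
    (h : RS es S x y) (hy : y ∉ S') :
    RS es S' x y ∨ ∃ z, pvE es cur z ∧ z ∉ S' ∧ RS es S' z y := by
  induction h using Relation.ReflTransGen.head_induction_on with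
  | refl => exact Or.inl Relation.ReflTransGen.refl
  | head hstep _ ih =>
    rename_i a m _
    rcases ih with ih | ih
    · by_cases hm : m ∈ S'
      · have hmc : m = cur := by
          rcases (hS' m).mp hm with h1 | h1
          · exact absurd h1 hstep.2
          · exact h1
        subst hmc
        rcases Relation.ReflTransGen.cases_head ih with rfl | ⟨z, hz, hrest⟩
        · exact absurd hm hy
        · exact Or.inr ⟨z, hz.1, hz.2, hrest⟩
      · exact Or.inl (Relation.ReflTransGen.head ⟨hstep.1, hm⟩ ih)
    · exact Or.inr ih

lemma sum_filter_remove {ks : List String} (f : String → Nat) (p p' : String → Bool) (cur : String)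
    (hnd : ks.Nodup) (hc : cur ∈ ks) (hp : p cur = true) (hp' : p' cur = false)
    (hagree : ∀ x, x ≠ cur → p x = p' x) :
    ((ks.filter p).map f).sum = f cur + ((ks.filter p').map f).sum := by
  induction ks with
  | nil => cases hc
  | cons k ks ih =>
    rcases List.mem_cons.mp hc with rfl | hk
    · have hnotin : cur ∉ ks := (List.nodup_cons.mp hnd).1
      have hsame : ks.filter p = ks.filter p' := by
        apply List.filter_congr
        intro x hx
        exact hagree x (fun hxc => hnotin (hxc ▸ hx))
      rw [List.filter_cons, if_pos hp, List.filter_cons, if_neg (by simp [hp'])]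
      simp [hsame]
    · have hkc : k ≠ cur := fun h => (List.nodup_cons.mp hnd).1 (h ▸ hk)
      rw [List.filter_cons, List.filter_cons, ← hagree k hkc]
      have := ih (List.nodup_cons.mp hnd).2 hk
      split_ifs with hpk
      · simp only [List.map_cons, List.sum_cons, this]
        omega
      · exact this

lemma sum_filter_le (ks : List String) (f : String → Nat) (p : String → Bool) :
    ((ks.filter p).map f).sum ≤ (ks.map f).sum := by
  induction ks with
  | nil => simp
  | cons k ks ih =>
    rw [List.filter_cons]
    split_ifs <;> simp <;> omega

lemma dfsA_spec {adj es} (hg : AdjGood adj es) :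
    ∀ fuel st S b, phi adj st S < fuel → (∀ x ∈ st, x ∈ adj.keys) → S.Nodup →
    ((dfsA adj fuel st S b).1.Nodup) ∧
    (∀ y, y ∈ (dfsA adj fuel st S b).1 ↔ y ∈ S ∨ Reach es st S y) ∧
    ∃ nw, (dfsA adj fuel st S b).2 = b ++ nw ∧ nw.Nodup ∧
      (∀ y, y ∈ nw ↔ Reach es st S y) := by
  intro fuel
  induction fuel with
  | zero => intro st S b hphi; exact absurd hphi (Nat.not_lt_zero _)
  | succ fuel ih =>
    intro st S b hphi hst hSnd
    cases st with
    | nil =>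
      refine ⟨hSnd, ?_, [], by simp [dfsA], by simp, ?_⟩
      · intro y; simp [dfsA, Reach]
      · intro y; simp [Reach]
    | cons current stack =>
      by_cases hcur : PySem.Set.contains S current = true
      · have hcurS : current ∈ S := (PySem.Set.contains_iff S current).mp hcur
        have hunfold : dfsA adj (fuel + 1) (current :: stack) S b = dfsA adj fuel stack S b := by
          rw [dfsA, if_pos hcur]
        have hphist : phi adj stack S < fuel := by
          simp only [phi, List.length_cons] at hphi ⊢
          omega
        obtain ⟨h1, h2, nw, h3, h4, h5⟩ := ih stack S b hphist
          (fun x hx => hst x (List.mem_cons_of_mem _ hx)) hSnd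
        have hreach : ∀ y, Reach es (current :: stack) S y ↔ Reach es stack S y := by
          intro y
          constructor
          · rintro ⟨x, hxst, hxS, hRS⟩
            rcases List.mem_cons.mp hxst with rfl | hxst
            · exact absurd hcurS hxS
            · exact ⟨x, hxst, hxS, hRS⟩
          · rintro ⟨x, hxst, hxS, hRS⟩
            exact ⟨x, List.mem_cons_of_mem _ hxst, hxS, hRS⟩
        rw [hunfold]
        refine ⟨h1, ?_, nw, h3, h4, ?_⟩
        · intro y; rw [h2, hreach]
        · intro y; rw [h5, hreach]
      · have hcurS : current ∉ S := fun h => hcur ((PySem.Set.contains_iff S current).mpr h)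
        have hcurF : PySem.Set.contains S current = false := by
          rw [← Bool.not_eq_true]; exact hcur
        have hcurK : current ∈ adj.keys := hst current (List.mem_cons_self ..)
        obtain ⟨hknd, hvnd, hadjmem, hkeys⟩ := hg
        set S' := PySem.Set.add S current with hS'def
        set news := PySem.List.sorted (PySem.Set.diff (adj.getD current PySem.Set.empty) S')
          (fun x => x) false with hnewsdef
        have hunfold : dfsA adj (fuel + 1) (current :: stack) S b =
            dfsA adj fuel (news.reverse ++ stack) S' (b ++ [current]) := by
          rw [dfsA, if_neg (by rw [hcurF]; simp)]
        have hS'mem : ∀ z, z ∈ S' ↔ z ∈ S ∨ z = current := fun z => PySem.Set.mem_add S current z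
        have hcurS' : current ∈ S' := (hS'mem current).mpr (Or.inr rfl)
        have hS'nd : S'.Nodup := PySem.Set.nodup_add S current hSnd
        have hnewsmem : ∀ z, z ∈ news ↔ pvE es current z ∧ z ∉ S' := by
          intro z
          rw [hnewsdef, PySem.List.mem_sorted, PySem.Set.mem_diff, hadjmem]
        have hst' : ∀ x ∈ news.reverse ++ stack, x ∈ adj.keys := by
          intro x hx
          rcases List.mem_append.mp hx with hx | hx
          · have := (hnewsmem x).mp (List.mem_reverse.mp hx)
            exact (hkeys x).mpr (pvNode_of_E this.1).2
          · exact hst x (List.mem_cons_of_mem _ hx)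
        have hphi' : phi adj (news.reverse ++ stack) S' < fuel := by
          have hsplit : ((adj.keys.filter (fun v => !PySem.Set.contains S v)).map
              (fun v => (adj.getD v PySem.Set.empty).length)).sum =
              (adj.getD current PySem.Set.empty).length +
              ((adj.keys.filter (fun v => !PySem.Set.contains S' v)).map
                (fun v => (adj.getD v PySem.Set.empty).length)).sum := by
            apply sum_filter_remove _ _ _ current hknd hcurK
            · rw [hcurF]; rfl
            · rw [(PySem.Set.contains_iff S' current).mpr hcurS']; rfl
            · intro x hxc
              have : (PySem.Set.contains S' x = true) ↔ (PySem.Set.contains S x = true) := by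
                rw [PySem.Set.contains_iff, PySem.Set.contains_iff, hS'mem]
                constructor
                · rintro (h | rfl)
                  · exact h
                  · exact absurd rfl hxc
                · exact Or.inl
              have hbool : PySem.Set.contains S' x = PySem.Set.contains S x :=
                Bool.eq_iff_iff.mpr this
              rw [hbool]
          have hnewslen : news.length ≤ (adj.getD current PySem.Set.empty).length := by
            rw [hnewsdef, PySem.List.length_sorted]
            exact List.length_filter_le _ _
          simp only [phi, List.length_append, List.length_reverse, List.length_cons] at hphi ⊢
          omega
        obtain ⟨h1, h2, nw', h3, h4, h5⟩ := ih (news.reverse ++ stack) S' (b ++ [current])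
          hphi' hst' hS'nd
        -- translation between reach sets
        have hup : ∀ y, Reach es (current :: stack) S y →
            y = current ∨ Reach es (news.reverse ++ stack) S' y := by
          rintro y ⟨x, hxst, hxS, hRS⟩
          have hynotS : y ∉ S := RS_not_mem hxS hRS
          by_cases hyS' : y ∈ S'
          · rcases (hS'mem y).mp hyS' with h | h
            · exact absurd h hynotS
            · exact Or.inl h
          · right
            have hfromcur : ∀ (w : String), RS es S' w y → w = current →
                Reach es (news.reverse ++ stack) S' y := by
              intro w hR hwc
              subst hwc
              rcases Relation.ReflTransGen.cases_head hR with rfl | ⟨z, hz, hrest⟩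
              · exact absurd hcurS' hyS'
              · refine ⟨z, List.mem_append_left _ (List.mem_reverse.mpr
                  ((hnewsmem z).mpr ⟨hz.1, hz.2⟩)), hz.2, hrest⟩
            rcases reroute hS'mem hRS hyS' with hR | ⟨z, hz1, hz2, hz3⟩
            · by_cases hxc : x = current
              · exact hfromcur x hR hxc
              · rcases List.mem_cons.mp hxst with rfl | hxst'
                · exact absurd rfl hxc
                · refine ⟨x, List.mem_append_right _ hxst', ?_, hR⟩
                  intro hxS'
                  rcases (hS'mem x).mp hxS' with h | h
                  · exact hxS h
                  · exact hxc h
            · refine ⟨z, List.mem_append_left _ (List.mem_reverse.mpr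
                ((hnewsmem z).mpr ⟨hz1, hz2⟩)), hz2, hz3⟩
        have hdown : ∀ y, y = current ∨ Reach es (news.reverse ++ stack) S' y →
            Reach es (current :: stack) S y := by
          rintro y (rfl | ⟨x, hxst', hxS', hRS⟩)
          · exact ⟨y, List.mem_cons_self .., hcurS, Relation.ReflTransGen.refl⟩
          · have hxS : x ∉ S := fun h => hxS' ((hS'mem x).mpr (Or.inl h))
            have hRS0 : RS es S x y := RS_anti (fun z hz => (hS'mem z).mpr (Or.inl hz)) hRS
            rcases List.mem_append.mp hxst' with hx | hx
            · have hEx := (hnewsmem x).mp (List.mem_reverse.mp hx)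
              exact ⟨current, List.mem_cons_self .., hcurS,
                Relation.ReflTransGen.head ⟨hEx.1, hxS⟩ hRS0⟩
            · exact ⟨x, List.mem_cons_of_mem _ hx, hxS, hRS0⟩
        have hcurReach : Reach es (current :: stack) S current :=
          ⟨current, List.mem_cons_self .., hcurS, Relation.ReflTransGen.refl⟩
        rw [hunfold]
        refine ⟨h1, ?_, current :: nw', ?_, ?_, ?_⟩
        · intro y
          rw [h2]
          constructor
          · rintro (hyS' | hr)
            · rcases (hS'mem y).mp hyS' with h | rfl
              · exact Or.inl h
              · exact Or.inr hcurReach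
            · exact Or.inr (hdown y (Or.inr hr))
          · rintro (hyS | hr)
            · exact Or.inl ((hS'mem y).mpr (Or.inl hyS))
            · rcases hup y hr with rfl | h
              · exact Or.inl hcurS'
              · exact Or.inr h
        · rw [h3]; simp
        · refine List.nodup_cons.mpr ⟨?_, h4⟩
          intro hmem
          obtain ⟨x, _, hxS', hRS⟩ := (h5 current).mp hmem
          exact (RS_not_mem hxS' hRS) hcurS'
        · intro y
          rw [List.mem_cons, h5]
          constructor
          · exact hdown y
          · exact hup y

-- ---- the canonical result, read off the components ----

def pvCompOf (comps : List (PySem.Set String)) (n : String) : PySem.Set String :=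
  ((comps.find? (fun c => PySem.Set.contains c n)).getD [])

def pvKeepN (comps : List (PySem.Set String)) (n : String) : Bool :=
  decide (2 ≤ (pvCompOf comps n).length) && decide (∀ m ∈ pvCompOf comps n, n ≤ m)

def pvCanon (comps : List (PySem.Set String)) (L : List String) : List (List String) :=
  (L.filter (pvKeepN comps)).map (fun n => PySem.List.sorted (pvCompOf comps n) (fun x => x) false)

lemma find?_of_mem_disjoint {comps : List (PySem.Set String)} (hdj : List.Pairwise Dj comps)
    {c n} (hc : c ∈ comps) (hn : n ∈ c) : comps.find? (fun c => PySem.Set.contains c n) = some c := by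
  induction comps with
  | nil => cases hc
  | cons c0 comps ih =>
    rcases List.mem_cons.mp hc with rfl | hc'
    · exact List.find?_cons_of_pos ((PySem.Set.contains_iff _ n).mpr hn)
    · have hd : Dj c0 c := (List.pairwise_cons.mp hdj).1 c hc'
      have hn0 : n ∉ c0 := fun h => hd n h hn
      rw [List.find?_cons_of_neg (by
        intro h
        exact hn0 ((PySem.Set.contains_iff c0 n).mp h))]
      exact ih (List.pairwise_cons.mp hdj).2 hc'

lemma compOf_spec {es comps} (hinv : CInv es comps) {n} (hn : pvNode es n) :
    n ∈ pvCompOf comps n ∧ (∀ x, x ∈ pvCompOf comps n ↔ pvConn es n x ∧ pvNode es x) ∧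
      (pvCompOf comps n).Nodup := by
  obtain ⟨hne, hcls, hcov, hdj⟩ := hinv
  obtain ⟨c, hc, hnc⟩ := (hcov n).mp hn
  have hf : pvCompOf comps n = c := by
    rw [pvCompOf, find?_of_mem_disjoint hdj hc hnc]
    rfl
  rw [hf]
  exact ⟨hnc, fun x => hcls c hc n hnc x, (hne c hc).2⟩

lemma compOf_mem {comps : List (PySem.Set String)} {n} (h : pvCompOf comps n ≠ []) :
    pvCompOf comps n ∈ comps := by
  rw [pvCompOf] at *
  cases hf : comps.find? (fun c => PySem.Set.contains c n) with
  | none => rw [hf] at h; simp at h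
  | some c =>
    simpa using List.mem_of_find?_eq_some hf

-- ---- A's outer loop produces the canonical result ----

def SeenSpec (es : List (String × String)) (pre S : List String) : Prop :=
  S.Nodup ∧ ∀ y, y ∈ S ↔ (pvNode es y ∧ ∃ s ∈ pre, pvConn es s y)

lemma pvCanon_cons (comps : List (PySem.Set String)) (n : String) (L' : List String) :
    pvCanon comps (n :: L') =
      if pvKeepN comps n then
        PySem.List.sorted (pvCompOf comps n) (fun x => x) false :: pvCanon comps L'
      else pvCanon comps L' := by
  rw [pvCanon, List.filter_cons]
  split_ifs with h
  · simp [pvCanon]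
  · simp_all [pvCanon]

lemma outer_spec {adj es comps fuel} (hg : AdjGood adj es) (hinv : CInv es comps)
    (hfuel : ∀ (start : String) (S : List String), phi adj [start] S < fuel)
    {L : List String} (hLlt : List.Pairwise (· < ·) L)
    (hLmem : ∀ x, x ∈ L ↔ x ∈ adj.keys) :
    ∀ (suf pre : List String) (S : PySem.Set String) (blocks : List (List String)),
      pre ++ suf = L → SeenSpec es pre S →
      (suf.foldl (outerStep adj fuel) (S, blocks)).2 = blocks ++ pvCanon comps suf := by
  intro suf
  induction suf with
  | nil => intro pre S blocks _ _; simp [pvCanon]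
  | cons n suf ih =>
    intro pre S blocks hsplit hseen
    obtain ⟨hSnd, hSmem⟩ := hseen
    have hnL : n ∈ L := by rw [← hsplit]; exact List.mem_append_right _ (List.mem_cons_self ..)
    have hnK : n ∈ adj.keys := (hLmem n).mp hnL
    have hnNode : pvNode es n := (hg.2.2.2 n).mp hnK
    have hLlt' : List.Pairwise (· < ·) (pre ++ n :: suf) := by rw [hsplit]; exact hLlt
    have hprelt : ∀ s ∈ pre, s < n :=
      fun s hs => (List.pairwise_append.mp hLlt').2.2 s hs n (List.mem_cons_self ..)
    have hsufgt : ∀ m ∈ suf, n < m :=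
      (List.pairwise_cons.mp (List.pairwise_append.mp hLlt').2.1).1
    rw [List.foldl_cons]
    by_cases hn : PySem.Set.contains S n = true
    · -- n already seen: skipped, and n is not the minimum of its component
      have hnS : n ∈ S := (PySem.Set.contains_iff S n).mp hn
      have hstep : outerStep adj fuel (S, blocks) n = (S, blocks) := by
        simp only [outerStep]
        rw [if_pos hn]
      obtain ⟨_, ns, hns, hconn⟩ := (hSmem n).mp hnS
      have hcs := compOf_spec hinv hnNode
      have hsmem : ns ∈ pvCompOf comps n :=
        (hcs.2.1 ns).mpr ⟨pvConn_symm hconn, pvConn_node (pvConn_symm hconn) hnNode⟩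
      have hkn : pvKeepN comps n = false := by
        rw [pvKeepN]
        have hnot : ¬ (∀ m ∈ pvCompOf comps n, n ≤ m) := by
          intro hall
          exact absurd (hall ns hsmem) (not_le.mpr (hprelt ns hns))
        rw [decide_eq_false hnot, Bool.and_false]
      rw [hstep, pvCanon_cons, hkn, if_neg (by simp)]
      refine ih (pre ++ [n]) S blocks (by rw [← hsplit]; simp) ⟨hSnd, ?_⟩
      intro y
      rw [hSmem y]
      constructor
      · rintro ⟨hnode, s, hs, hconns⟩
        exact ⟨hnode, s, List.mem_append_left _ hs, hconns⟩
      · rintro ⟨hnode, s, hs, hconns⟩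
        rcases List.mem_append.mp hs with hs | hs
        · exact ⟨hnode, s, hs, hconns⟩
        · rcases List.mem_cons.mp hs with rfl | hempty
          · exact ⟨hnode, ns, hns, hconn.trans hconns⟩
          · cases hempty
    · -- n unseen: the DFS emits exactly n's component
      have hnS : n ∉ S := fun h => hn ((PySem.Set.contains_iff S n).mpr h)
      have hcl : ∀ z, pvConn es n z → z ∉ S := by
        intro z hz hzS
        obtain ⟨_, s, hs, hconnsz⟩ := (hSmem z).mp hzS
        exact hnS ((hSmem n).mpr ⟨hnNode, s, hs, hconnsz.trans (pvConn_symm hz)⟩)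
      obtain ⟨hr1nd, hr1mem, nw, hr2, hnwnd, hnwmem⟩ := dfsA_spec hg fuel [n] S []
        (hfuel n S) (by
          intro x hx
          rcases List.mem_cons.mp hx with rfl | hempty
          · exact hnK
          · cases hempty) hSnd
      have hreach : ∀ y, Reach es [n] S y ↔ pvConn es n y := by
        intro y
        constructor
        · rintro ⟨x, hx, hxS, hrs⟩
          rcases List.mem_cons.mp hx with rfl | hempty
          · exact RS_conn hrs
          · cases hempty
        · intro hc
          exact ⟨n, List.mem_cons_self .., hnS, conn_RS hcl hc⟩
      have hcs := compOf_spec hinv hnNode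
      have hnwcomp : ∀ y, y ∈ nw ↔ y ∈ pvCompOf comps n := by
        intro y
        rw [hnwmem, hreach, hcs.2.1]
        constructor
        · intro h; exact ⟨h, pvConn_node h hnNode⟩
        · exact fun h => h.1
      have hperm : nw.Perm (pvCompOf comps n) :=
        (List.perm_ext_iff_of_nodup hnwnd hcs.2.2).mpr hnwcomp
      have hlen : nw.length = (pvCompOf comps n).length := hperm.length_eq
      have hmin : ∀ m ∈ pvCompOf comps n, n ≤ m := by
        intro m hm
        by_contra hlt
        rw [not_le] at hlt
        have hmnode := ((hcs.2.1 m).mp hm).2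
        have hmK : m ∈ adj.keys := (hg.2.2.2 m).mpr hmnode
        have hmL : m ∈ L := (hLmem m).mpr hmK
        rw [← hsplit] at hmL
        rcases List.mem_append.mp hmL with hmpre | hmtail
        · exact hnS ((hSmem n).mpr ⟨hnNode, m, hmpre, pvConn_symm ((hcs.2.1 m).mp hm).1⟩)
        · rcases List.mem_cons.mp hmtail with rfl | hmsuf
          · exact absurd hlt (lt_irrefl _)
          · exact absurd hlt (not_lt.mpr (le_of_lt (hsufgt m hmsuf)))
      have hr2' : (dfsA adj fuel [n] S []).2 = nw := by rw [hr2]; simp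
      have hSS' : SeenSpec es (pre ++ [n]) (dfsA adj fuel [n] S []).1 := by
        refine ⟨hr1nd, ?_⟩
        intro y
        rw [hr1mem y]
        constructor
        · rintro (hyS | hrr)
          · obtain ⟨hnode, s, hs, hc⟩ := (hSmem y).mp hyS
            exact ⟨hnode, s, List.mem_append_left _ hs, hc⟩
          · have hc := (hreach y).mp hrr
            exact ⟨pvConn_node hc hnNode, n, List.mem_append_right _ (List.mem_cons_self ..), hc⟩
        · rintro ⟨hnode, s, hs, hc⟩
          rcases List.mem_append.mp hs with hs | hs
          · exact Or.inl ((hSmem y).mpr ⟨hnode, s, hs, hc⟩)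
          · rcases List.mem_cons.mp hs with rfl | hempty
            · exact Or.inr ((hreach y).mpr hc)
            · cases hempty
      by_cases h2 : 2 ≤ (dfsA adj fuel [n] S []).2.length
      · have hstep : outerStep adj fuel (S, blocks) n =
            ((dfsA adj fuel [n] S []).1,
              blocks ++ [PySem.List.sorted (dfsA adj fuel [n] S []).2 (fun x => x) false]) := by
          simp only [outerStep]
          rw [if_neg hn, if_pos h2]
        have hsorted : PySem.List.sorted (dfsA adj fuel [n] S []).2 (fun x => x) false =
            PySem.List.sorted (pvCompOf comps n) (fun x => x) false := by
          rw [hr2']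
          exact PySem.List.sorted_eq_sorted_of_perm _ _ _ (fun a b h => h) hperm
        have hkn : pvKeepN comps n = true := by
          rw [pvKeepN]
          have h2' : 2 ≤ (pvCompOf comps n).length := by
            rw [hr2'] at h2
            omega
          rw [decide_eq_true h2', decide_eq_true hmin]
          rfl
        rw [hstep, pvCanon_cons, hkn, if_pos rfl, hsorted]
        have := ih (pre ++ [n]) (dfsA adj fuel [n] S []).1
          (blocks ++ [PySem.List.sorted (pvCompOf comps n) (fun x => x) false])
          (by rw [← hsplit]; simp) hSS'
        rw [this]
        simp
      · have hstep : outerStep adj fuel (S, blocks) n = ((dfsA adj fuel [n] S []).1, blocks) := by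
          simp only [outerStep]
          rw [if_neg hn, if_neg h2]
        have hkn : pvKeepN comps n = false := by
          rw [pvKeepN]
          have h2' : ¬ 2 ≤ (pvCompOf comps n).length := by
            rw [hr2'] at h2
            omega
          simp [h2']
        rw [hstep, pvCanon_cons, hkn, if_neg (by simp)]
        exact ih (pre ++ [n]) (dfsA adj fuel [n] S []).1 blocks (by rw [← hsplit]; simp) hSS'

lemma fuel_ok {adj es} (hg : AdjGood adj es) (start : String) (S : List String) :
    phi adj [start] S < 2 + (adj.values.map List.length).sum := by
  have hv : adj.values = adj.keys.map (fun k => adj.getD k PySem.Set.empty) :=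
    PySem.Dict.values_eq_map_keys adj hg.1 PySem.Set.empty
  have hle := sum_filter_le adj.keys (fun v => (adj.getD v PySem.Set.empty).length)
    (fun v => !PySem.Set.contains S v)
  simp only [phi, List.length_cons, List.length_nil, hv, List.map_map]
  simp only [Function.comp_def]
  omega

lemma sortedKeys_facts {adj : PySem.Dict String (PySem.Set String)} (hknd : adj.keys.Nodup) :
    (PySem.List.sorted adj.keys (fun x => x) false).Nodup ∧
    List.Pairwise (· < ·) (PySem.List.sorted adj.keys (fun x => x) false) ∧
    (∀ x, x ∈ PySem.List.sorted adj.keys (fun x => x) false ↔ x ∈ adj.keys) := by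
  have hperm := PySem.List.sorted_perm adj.keys (fun x => x) false
  have hnd : (PySem.List.sorted adj.keys (fun x => x) false).Nodup := hperm.nodup_iff.mpr hknd
  have hle := PySem.List.sorted_pairwise adj.keys (fun x => x)
  refine ⟨hnd, (hle.and hnd).imp (fun h => lt_of_le_of_ne h.1 h.2), ?_⟩
  exact fun x => PySem.List.mem_sorted adj.keys (fun x => x) false x

lemma compOf_self_mem {comps : List (PySem.Set String)} {n} (h : pvCompOf comps n ≠ []) :
    n ∈ pvCompOf comps n := by
  rw [pvCompOf] at *
  cases hf : comps.find? (fun c => PySem.Set.contains c n) with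
  | none => rw [hf] at h; simp at h
  | some c =>
    have := List.find?_some hf
    simpa using (PySem.Set.contains_iff c n).mp this

lemma b_final (hp : List (List (String × String))) :
    correlation_blocks_py_alt hp =
      pvCanon (pvComps hp) (PySem.List.sorted (pvAdj hp).keys (fun x => x) false) := by
  obtain ⟨hknd, hvnd, hadjmem, hkeys⟩ := adjGood_pvAdj hp
  have hinv := inv_pvComps hp
  obtain ⟨hne, hcls, hcov, hdj⟩ := hinv
  obtain ⟨hLnd, hLlt, hLmem⟩ := sortedKeys_facts hknd
  set comps := pvComps hp with hcomps
  set L := PySem.List.sorted (pvAdj hp).keys (fun x => x) false with hL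
  set blocks := (comps.filter (fun c => 2 ≤ c.length)).map
    (fun c => PySem.List.sorted c (fun x => x) false) with hblocks
  have hBdef : correlation_blocks_py_alt hp =
      PySem.List.sorted blocks (fun t => PySem.List.pyGetD t 0 "") false := rfl
  rw [hBdef]
  -- membership characterizations
  have hmemBlocks : ∀ x, x ∈ blocks ↔
      ∃ c ∈ comps, 2 ≤ c.length ∧ x = PySem.List.sorted c (fun x => x) false := by
    intro x
    rw [hblocks, List.mem_map]
    constructor
    · rintro ⟨c, hc, rfl⟩
      rw [List.mem_filter] at hc
      exact ⟨c, hc.1, by simpa using hc.2, rfl⟩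
    · rintro ⟨c, hc, hlen, rfl⟩
      exact ⟨c, List.mem_filter.mpr ⟨hc, by simpa using hlen⟩, rfl⟩
  have hkept : ∀ n, pvKeepN comps n = true →
      2 ≤ (pvCompOf comps n).length ∧ (∀ m ∈ pvCompOf comps n, n ≤ m) ∧
        n ∈ pvCompOf comps n ∧ pvCompOf comps n ∈ comps := by
    intro n hk
    rw [pvKeepN, Bool.and_eq_true, decide_eq_true_eq, decide_eq_true_eq] at hk
    have hne' : pvCompOf comps n ≠ [] := by
      intro h
      rw [h] at hk
      simp at hk
    exact ⟨hk.1, hk.2, compOf_self_mem hne', compOf_mem hne'⟩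
  have hmemCanon : ∀ x, x ∈ pvCanon comps L ↔
      ∃ c ∈ comps, 2 ≤ c.length ∧ x = PySem.List.sorted c (fun x => x) false := by
    intro x
    rw [pvCanon, List.mem_map]
    constructor
    · rintro ⟨n, hn, rfl⟩
      rw [List.mem_filter] at hn
      obtain ⟨h1, h2, h3, h4⟩ := hkept n hn.2
      exact ⟨pvCompOf comps n, h4, h1, rfl⟩
    · rintro ⟨c, hc, hlen, rfl⟩
      have hcne : c ≠ [] := by
        intro h
        rw [h] at hlen
        simp at hlen
      obtain ⟨m, t, hsort⟩ : ∃ m t, PySem.List.sorted c (fun x => x) false = m :: t := by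
        cases hs : PySem.List.sorted c (fun x => x) false with
        | nil => exact absurd ((PySem.List.sorted_eq_nil_iff c _ false).mp hs) hcne
        | cons m t => exact ⟨m, t, rfl⟩
      have hmc : m ∈ c := by
        rw [← PySem.List.mem_sorted c (fun x => x) false, hsort]
        exact List.mem_cons_self ..
      have hmle : ∀ y ∈ c, m ≤ y := PySem.List.key_head_sorted_le c (fun x => x) hsort
      have hmnode : pvNode (pvEdges hp) m := (hcov m).mpr ⟨c, hc, hmc⟩
      have hmL : m ∈ L := (hLmem m).mpr ((hkeys m).mpr hmnode)
      have hcompm : pvCompOf comps m = c := by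
        rw [pvCompOf, find?_of_mem_disjoint hdj hc hmc]
        rfl
      refine ⟨m, List.mem_filter.mpr ⟨hmL, ?_⟩, by rw [hcompm]⟩
      rw [pvKeepN, hcompm, decide_eq_true hlen, decide_eq_true hmle]
      rfl
  -- nodup
  have hcompsnd : comps.Nodup := by
    refine List.Pairwise.imp_of_mem ?_ hdj
    intro a b ha _ hDj hEq
    obtain ⟨x, hx⟩ := List.exists_mem_of_ne_nil a (hne a ha).1
    exact hDj x hx (hEq ▸ hx)
  have hndBlocks : blocks.Nodup := by
    rw [hblocks]
    refine List.Nodup.map_on ?_ (hcompsnd.filter _)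
    intro c hc c' hc' hEq
    rw [List.mem_filter] at hc hc'
    by_contra hne'
    have hDj := List.Pairwise.forall (fun _ _ h => Dj_symm h) hdj hc.1 hc'.1 hne'
    have hlen : 2 ≤ c.length := by simpa using hc.2
    have hcne : c ≠ [] := by intro h; rw [h] at hlen; simp at hlen
    obtain ⟨x, hx⟩ := List.exists_mem_of_ne_nil c hcne
    have hx' : x ∈ c' := by
      rw [← PySem.List.mem_sorted c' (fun x => x) false, ← hEq,
        PySem.List.mem_sorted]
      exact hx
    exact hDj x hx hx'
  have hndCanon : (pvCanon comps L).Nodup := by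
    rw [pvCanon]
    refine List.Nodup.map_on ?_ (hLnd.filter _)
    intro n hn n' hn' hEq
    rw [List.mem_filter] at hn hn'
    obtain ⟨hl1, hm1, hs1, hc1⟩ := hkept n hn.2
    obtain ⟨hl2, hm2, hs2, hc2⟩ := hkept n' hn'.2
    have hsame : pvCompOf comps n = pvCompOf comps n' := by
      by_contra hner
      have hDj := List.Pairwise.forall (fun _ _ h => Dj_symm h) hdj hc1 hc2 hner
      have : n ∈ pvCompOf comps n' := by
        rw [← PySem.List.mem_sorted (pvCompOf comps n') (fun x => x) false, ← hEq,
          PySem.List.mem_sorted]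
        exact hs1
      exact hDj n hs1 this
    exact le_antisymm (hm1 n' (hsame ▸ hs2)) (hm2 n (hsame.symm ▸ hs1))
  have hperm : (pvCanon comps L).Perm blocks :=
    (List.perm_ext_iff_of_nodup hndCanon hndBlocks).mpr
      (fun x => by rw [hmemCanon, hmemBlocks])
  -- pairwise strictly increasing first elements
  have hkeyval : ∀ n, pvKeepN comps n = true →
      PySem.List.pyGetD (PySem.List.sorted (pvCompOf comps n) (fun x => x) false) 0 "" = n := by
    intro n hk
    obtain ⟨hl, hm, hs, hc⟩ := hkept n hk
    obtain ⟨m, t, hsort⟩ : ∃ m t,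
        PySem.List.sorted (pvCompOf comps n) (fun x => x) false = m :: t := by
      cases hsx : PySem.List.sorted (pvCompOf comps n) (fun x => x) false with
      | nil =>
        have := (PySem.List.sorted_eq_nil_iff _ _ false).mp hsx
        rw [this] at hs
        cases hs
      | cons m t => exact ⟨m, t, rfl⟩
    rw [hsort, PySem.List.pyGetD_zero_cons]
    have hmmem : m ∈ pvCompOf comps n := by
      rw [← PySem.List.mem_sorted (pvCompOf comps n) (fun x => x) false, hsort]
      exact List.mem_cons_self ..
    have h1 : m ≤ n := PySem.List.key_head_sorted_le _ (fun x => x) hsort n hs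
    exact le_antisymm h1 (hm m hmmem)
  have hpw : List.Pairwise
      (fun a b => PySem.List.pyGetD a 0 "" < PySem.List.pyGetD b 0 "") (pvCanon comps L) := by
    rw [pvCanon, List.pairwise_map]
    refine List.Pairwise.imp_of_mem ?_
      (List.Pairwise.sublist List.filter_sublist hLlt)
    intro a b ha hb hlt
    rw [List.mem_filter] at ha hb
    rw [hkeyval a ha.2, hkeyval b hb.2]
    exact hlt
  exact PySem.List.sorted_eq_of_perm_of_pairwise_lt blocks (pvCanon comps L)
    (fun t => PySem.List.pyGetD t 0 "") hperm hpw

-- ===== VERDICT (by name: the statement is the Claim_ definition above) =====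
theorem correlation_blocks_py_spec : Claim_equal_correlation_blocks_py := by
  intro hp _
  unfold Spec_correlation_blocks_py
  have hg := adjGood_pvAdj hp
  have hinv := inv_pvComps hp
  obtain ⟨hLnd, hLlt, hLmem⟩ := sortedKeys_facts hg.1
  have hAdef : correlation_blocks_py hp =
      ((PySem.List.sorted (pvAdj hp).keys (fun x => x) false).foldl
        (outerStep (pvAdj hp) (2 + ((pvAdj hp).values.map List.length).sum))
        (PySem.Set.empty, [])).2 := rfl
  have hseen0 : SeenSpec (pvEdges hp) [] PySem.Set.empty := by
    refine ⟨List.nodup_nil, ?_⟩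
    intro y
    simp [PySem.Set.empty]
  have hA := outer_spec hg hinv (fun start S => fuel_ok hg start S) hLlt hLmem
    (PySem.List.sorted (pvAdj hp).keys (fun x => x) false) [] PySem.Set.empty []
    (by simp) hseen0
  rw [hAdef, hA, b_final hp]
  simp
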